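-- pv_equiv track=rewrite | github.com/HendrixMM/pharmaceutical-rag-knowledge-expert | src/medical_guardrails.py | _select_sanitized_query
-- ===== SOURCE A (Python) =====
-- from typing import Any
--
-- def _select_sanitized_query(original: str | None, candidates: list[Any]) -> str:
--     """Return the first non-empty sanitized candidate, preferring changes over original text."""
--     baseline = original or ""
--
--     for candidate in candidates:
--         if isinstance(candidate, str) and candidate.strip() and candidate != baseline:
--             return candidate
--
--     for candidate in candidates:
--         if isinstance(candidate, str) and candidate.strip():
--             return candidate
--
--     return baseline
-- ===== SOURCE B (Python) =====
-- def _select_sanitized_query(original, candidates):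
--     """Single pass: return first changed non-empty candidate; remember first non-empty as fallback."""
--     baseline = original or ""
--     fallback = None
--     for candidate in candidates:
--         if isinstance(candidate, str) and candidate.strip():
--             if candidate != baseline:
--                 return candidate
--             if fallback is None:
--                 fallback = candidate
--     return fallback if fallback is not None else baseline
-- ===== Notes on version B (the rewrite author's own statement) =====
-- stated objective: simpler
-- what changed: Replaced A's two sequential scans of the candidate list by one single pass that returns a changed non-empty candidate immediately and threads a fallback accumulator holding the first non-empty (baseline-equal) candidate.
import Mathlib
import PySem

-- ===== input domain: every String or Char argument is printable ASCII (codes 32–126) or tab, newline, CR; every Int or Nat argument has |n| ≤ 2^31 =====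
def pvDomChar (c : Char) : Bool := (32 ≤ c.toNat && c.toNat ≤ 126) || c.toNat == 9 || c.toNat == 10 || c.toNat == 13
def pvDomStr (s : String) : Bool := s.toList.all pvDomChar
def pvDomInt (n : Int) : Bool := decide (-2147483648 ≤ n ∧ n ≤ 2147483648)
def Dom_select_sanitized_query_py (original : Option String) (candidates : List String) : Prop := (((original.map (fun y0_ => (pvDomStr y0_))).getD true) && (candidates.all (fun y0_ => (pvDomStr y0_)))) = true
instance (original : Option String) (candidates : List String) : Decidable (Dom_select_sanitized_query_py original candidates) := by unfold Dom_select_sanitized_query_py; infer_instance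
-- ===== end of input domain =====

-- B merges A's two sequential scans into one accumulator-threaded pass (objective: simpler).

-- ===== PORT A =====
-- `baseline = original or ""`
def pvBaseline (original : Option String) : String :=
  match original with
  | some s => if s = "" then "" else s
  | none => ""

-- first loop: first candidate with non-empty strip that differs from baseline
def pvLoopA1 (baseline : String) : List String → Option String
  | [] => none
  | c :: cs =>
    if PySem.Str.strip c ≠ "" ∧ c ≠ baseline then some c else pvLoopA1 baseline cs

-- second loop: first candidate with non-empty strip
def pvLoopA2 : List String → Option String
  | [] => none
  | c :: cs => if PySem.Str.strip c ≠ "" then some c else pvLoopA2 cs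

def select_sanitized_query_py (original : Option String) (candidates : List String) : String :=
  let baseline := pvBaseline original
  match pvLoopA1 baseline candidates with
  | some c => c
  | none =>
    match pvLoopA2 candidates with
    | some c => c
    | none => baseline

-- ===== PORT B =====
-- single pass threading the `fallback` accumulator
def pvLoopB (baseline : String) (fallback : Option String) : List String → String
  | [] => match fallback with | some f => f | none => baseline
  | c :: cs =>
    if PySem.Str.strip c ≠ "" then
      if c ≠ baseline then c
      else pvLoopB baseline (match fallback with | none => some c | some f => some f) cs
    else pvLoopB baseline fallback cs

def select_sanitized_query_py_alt (original : Option String) (candidates : List String) : String :=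
  let baseline := pvBaseline original
  pvLoopB baseline none candidates

-- ===== PRECONDITION & SPEC =====
def Spec_select_sanitized_query_py (original : Option String) (candidates : List String) (out : String) : Prop := out = select_sanitized_query_py_alt original candidates
instance (original : Option String) (candidates : List String) (out : String) : Decidable (Spec_select_sanitized_query_py original candidates out) := by unfold Spec_select_sanitized_query_py; infer_instance

-- ===== CLAIM (what is proved, stated in full; the proofs are below) =====
def Claim_equal_select_sanitized_query_py : Prop := ∀ (original : Option String) (candidates : List String), Dom_select_sanitized_query_py original candidates → Spec_select_sanitized_query_py original candidates (select_sanitized_query_py original candidates)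

-- ===== LEMMAS AND PROOFS =====
-- loop invariant: B's single pass equals A's two scans, with `fallback` standing in
-- for the non-empty candidates already seen (all equal to baseline)
theorem pvLoopB_eq (baseline : String) (fallback : Option String) (cs : List String) :
    pvLoopB baseline fallback cs =
      match pvLoopA1 baseline cs with
      | some c => c
      | none =>
        match fallback with
        | some f => f
        | none => match pvLoopA2 cs with | some c => c | none => baseline := by
  induction cs generalizing fallback with
  | nil => cases fallback <;> simp [pvLoopB, pvLoopA1, pvLoopA2]
  | cons c cs ih =>
    by_cases h1 : PySem.Str.strip c ≠ ""
    · by_cases h2 : c ≠ baseline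
      · simp [pvLoopB, pvLoopA1, h1, h2]
      · cases fallback <;>
          simp [pvLoopB, pvLoopA1, pvLoopA2, h1, h2, ih]
    · cases fallback <;>
        simp [pvLoopB, pvLoopA1, pvLoopA2, h1, ih]

-- ===== VERDICT (by name: the statement is the Claim_ definition above) =====
theorem select_sanitized_query_py_spec : Claim_equal_select_sanitized_query_py := by
  intro original candidates _
  unfold Spec_select_sanitized_query_py select_sanitized_query_py select_sanitized_query_py_alt
  rw [pvLoopB_eq]
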